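-- pv_equiv track=rewrite | github.com/OmarAl-Saleh/CS846-week11-presentation | Problem_A/A2/grid_matrix_graph_search.py | search_documents
-- ===== SOURCE A (Python) =====
-- from typing import List, Tuple
--
-- def search_documents(documents: List[str], query: str) -> List[int]:
--     """
--     Problem 2:
--     Return indices of documents that contain all terms in the query.
--
--     """
--     query_terms = query.lower().split()
--     result = []
--
--     for index, doc in enumerate(documents):
--         words = doc.lower().split()
--         if all(term in words for term in query_terms):
--             result.append(index)
--
--     return result
-- ===== SOURCE B (Python) =====
-- def search_documents(documents, query):
--     """Inverted index + set intersection instead of scanning every document per term."""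
--     index = {}
--     for i, doc in enumerate(documents):
--         for w in doc.lower().split():
--             index.setdefault(w, set()).add(i)
--     terms = query.lower().split()
--     if not terms:
--         return list(range(len(documents)))
--     result = index.get(terms[0], set())
--     for t in terms[1:]:
--         result = result & index.get(t, set())
--     return sorted(result)
-- ===== Notes on version B (the rewrite author's own statement) =====
-- stated objective: alternative
-- what changed: B builds an inverted index (word -> set of document indices) in one pass and intersects the query terms' index sets, then sorts the result, instead of re-scanning every document's word list for every query term.
import Mathlib
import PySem

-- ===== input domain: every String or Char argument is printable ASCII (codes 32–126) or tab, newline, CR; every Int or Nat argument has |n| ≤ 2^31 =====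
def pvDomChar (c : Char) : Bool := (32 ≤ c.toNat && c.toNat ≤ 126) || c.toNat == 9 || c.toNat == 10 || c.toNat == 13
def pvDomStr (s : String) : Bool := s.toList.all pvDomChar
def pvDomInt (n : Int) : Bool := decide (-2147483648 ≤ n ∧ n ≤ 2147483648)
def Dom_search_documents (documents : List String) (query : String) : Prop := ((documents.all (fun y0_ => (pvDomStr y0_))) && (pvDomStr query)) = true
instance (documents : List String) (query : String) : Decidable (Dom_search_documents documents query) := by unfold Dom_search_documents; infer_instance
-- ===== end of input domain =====

-- B builds an inverted index (word -> set of document indices) once and intersects the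
-- query terms' index sets, then sorts; A rescans every document's word list per term.

-- ===== PORT A =====
def search_documents (documents : List String) (query : String) : List Int :=
  let query_terms := PySem.Str.split₀ (PySem.Str.lower query)
  (PySem.List.enumerate documents).foldl (fun result p =>
    let ws := PySem.Str.split₀ (PySem.Str.lower p.2)
    if query_terms.all (fun term => ws.contains term) then result ++ [p.1] else result) []

-- ===== PORT B =====
-- helper: the inverted index built in Source B's first loop
def pvIndex (documents : List String) : PySem.Dict String (PySem.Set Int) :=
  (PySem.List.enumerate documents).foldl (fun d p =>
    (PySem.Str.split₀ (PySem.Str.lower p.2)).foldl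
      (fun d w => d.modify w [] (fun s => s.add p.1)) d) PySem.Dict.empty

def search_documents_alt (documents : List String) (query : String) : List Int :=
  let index := pvIndex documents
  match PySem.Str.split₀ (PySem.Str.lower query) with
  | [] => PySem.List.pyRange 0 documents.length 1
  | t0 :: rest =>
    let res := rest.foldl (fun s t => PySem.Set.inter s (index.getD t [])) (index.getD t0 [])
    PySem.List.sorted res (fun x => x)

-- ===== PRECONDITION & SPEC =====
def Spec_search_documents (documents : List String) (query : String) (out : List Int) : Prop := out = search_documents_alt documents query
instance (documents : List String) (query : String) (out : List Int) : Decidable (Spec_search_documents documents query out) := by unfold Spec_search_documents; infer_instance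

-- ===== CLAIM (what is proved, stated in full; the proofs are below) =====
def Claim_equal_search_documents : Prop := ∀ (documents : List String) (query : String), Dom_search_documents documents query → Spec_search_documents documents query (search_documents documents query)

-- ===== LEMMAS AND PROOFS =====

-- inner loop of the index build: membership in one bucket
theorem getD_wordloop (ws : List String) (d : PySem.Dict String (PySem.Set Int)) (j : Int)
    (t : String) (i : Int) :
    i ∈ (ws.foldl (fun d w => d.modify w [] (fun s => s.add j)) d).getD t []
      ↔ i ∈ d.getD t [] ∨ (i = j ∧ t ∈ ws) := by
  induction ws generalizing d with
  | nil => simp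
  | cons w ws ih =>
    simp only [List.foldl_cons, ih, List.mem_cons]
    by_cases hw : t = w
    · subst hw
      rw [PySem.Dict.getD_modify_self]
      simp [PySem.Set.mem_add]
      tauto
    · rw [PySem.Dict.getD_modify_of_ne d [] _ hw]
      tauto

theorem nodup_wordloop (ws : List String) (d : PySem.Dict String (PySem.Set Int)) (j : Int)
    (t : String) (hd : ∀ t', (d.getD t' []).Nodup) :
    ((ws.foldl (fun d w => d.modify w [] (fun s => s.add j)) d).getD t []).Nodup := by
  induction ws generalizing d with
  | nil => exact hd t
  | cons w ws ih =>
    refine ih _ (fun t' => ?_)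
    by_cases hw : t' = w
    · subst hw; rw [PySem.Dict.getD_modify_self]; exact PySem.Set.nodup_add _ _ (hd _)
    · rw [PySem.Dict.getD_modify_of_ne d [] _ hw]; exact hd t'

-- membership in a bucket of the full index, over an arbitrary enumerated tail
theorem getD_buildloop (l : List (Int × String)) (d : PySem.Dict String (PySem.Set Int))
    (t : String) (i : Int) :
    i ∈ (l.foldl (fun d p => (PySem.Str.split₀ (PySem.Str.lower p.2)).foldl
          (fun d w => d.modify w [] (fun s => s.add p.1)) d) d).getD t []
      ↔ i ∈ d.getD t [] ∨ ∃ p ∈ l, i = p.1 ∧ t ∈ PySem.Str.split₀ (PySem.Str.lower p.2) := by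
  induction l generalizing d with
  | nil => simp
  | cons p l ih =>
    simp only [List.foldl_cons, ih, getD_wordloop, List.mem_cons]
    constructor
    · rintro ((h | h) | ⟨q, hq, h⟩)
      · exact .inl h
      · exact .inr ⟨p, .inl rfl, h⟩
      · exact .inr ⟨q, .inr hq, h⟩
    · rintro (h | ⟨q, (rfl | hq), h⟩)
      · exact .inl (.inl h)
      · exact .inl (.inr h)
      · exact .inr ⟨q, hq, h⟩

theorem mem_pvIndex (documents : List String) (t : String) (i : Int) :
    i ∈ (pvIndex documents).getD t []
      ↔ ∃ p ∈ PySem.List.enumerate documents, i = p.1 ∧ t ∈ PySem.Str.split₀ (PySem.Str.lower p.2) := by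
  unfold pvIndex
  rw [getD_buildloop]
  simp [PySem.Dict.getD_empty]

theorem nodup_buildloop (l : List (Int × String)) (d : PySem.Dict String (PySem.Set Int))
    (t : String) (hd : ∀ t', (d.getD t' []).Nodup) :
    ((l.foldl (fun d p => (PySem.Str.split₀ (PySem.Str.lower p.2)).foldl
          (fun d w => d.modify w [] (fun s => s.add p.1)) d) d).getD t []).Nodup := by
  induction l generalizing d with
  | nil => exact hd t
  | cons p l ih => exact ih _ (fun t' => nodup_wordloop _ _ _ _ hd)

theorem nodup_pvIndex (documents : List String) (t : String) :
    ((pvIndex documents).getD t []).Nodup := by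
  unfold pvIndex
  exact nodup_buildloop _ _ _ (by intro t'; simp [PySem.Dict.getD_empty])

-- intersection loop: membership
theorem mem_interloop (l : List String) (g : String → PySem.Set Int) (s0 : PySem.Set Int) (i : Int) :
    i ∈ l.foldl (fun s t => PySem.Set.inter s (g t)) s0 ↔ i ∈ s0 ∧ ∀ t ∈ l, i ∈ g t := by
  induction l generalizing s0 with
  | nil => simp
  | cons t l ih =>
    simp only [List.foldl_cons, ih, PySem.Set.mem_inter, List.mem_cons]
    constructor
    · rintro ⟨⟨h0, hg⟩, h⟩
      exact ⟨h0, fun t' ht' => ht'.elim (fun e => e ▸ hg) (h t')⟩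
    · rintro ⟨h0, h⟩
      exact ⟨⟨h0, h t (.inl rfl)⟩, fun t' ht' => h t' (.inr ht')⟩

theorem nodup_interloop (l : List String) (g : String → PySem.Set Int) (s0 : PySem.Set Int)
    (h0 : s0.Nodup) : (l.foldl (fun s t => PySem.Set.inter s (g t)) s0).Nodup := by
  induction l generalizing s0 with
  | nil => exact h0
  | cons t l ih => exact ih _ (PySem.Set.nodup_inter _ _ h0)

-- two enumerated pairs with equal first components are equal
theorem enumerate_fst_inj (documents : List String) {p q : Int × String}
    (hp : p ∈ PySem.List.enumerate documents) (hq : q ∈ PySem.List.enumerate documents)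
    (h : p.1 = q.1) : p = q := by
  rw [PySem.List.mem_enumerate_iff] at hp hq
  obtain ⟨k, hk, rfl⟩ := hp
  obtain ⟨k', hk', rfl⟩ := hq
  simp at h
  subst h
  rfl

theorem contains_all_iff (terms ws : List String) :
    terms.all (fun term => ws.contains term) = true ↔ ∀ t ∈ terms, t ∈ ws := by
  simp [List.all_eq_true]

-- ===== VERDICT (by name: the statement is the Claim_ definition above) =====
theorem search_documents_spec : Claim_equal_search_documents := by
  intro documents query _
  unfold Spec_search_documents search_documents search_documents_alt
  cases hts : PySem.Str.split₀ (PySem.Str.lower query) with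
  | nil =>
    simp only [List.all_nil, if_true, PySem.List.foldl_append_singleton_eq_map,
      PySem.List.map_fst_enumerate, List.nil_append, zero_add]
  | cons t0 rest =>
    rw [PySem.List.foldl_append_if]
    rw [List.nil_append]
    have hpair : (((PySem.List.enumerate documents).filter
          (fun p => (t0 :: rest).all (fun term => (PySem.Str.split₀ (PySem.Str.lower p.2)).contains term))).map
          (fun p => p.1)).Pairwise (· < ·) := by
      rw [List.pairwise_map]
      exact (PySem.List.pairwise_lt_enumerate documents 0).filter _
    have hperm : (((PySem.List.enumerate documents).filter
          (fun p => (t0 :: rest).all (fun term => (PySem.Str.split₀ (PySem.Str.lower p.2)).contains term))).map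
          (fun p => p.1)).Perm
        (rest.foldl (fun s t => PySem.Set.inter s ((pvIndex documents).getD t []))
          ((pvIndex documents).getD t0 [])) := by
      rw [List.perm_ext_iff_of_nodup (hpair.imp ne_of_lt)
        (nodup_interloop _ _ _ (nodup_pvIndex documents t0))]
      intro i
      rw [mem_interloop]
      simp only [List.mem_map, List.mem_filter, contains_all_iff]
      constructor
      · rintro ⟨p, ⟨hp, hall⟩, rfl⟩
        exact ⟨(mem_pvIndex documents t0 p.1).2 ⟨p, hp, rfl, hall t0 List.mem_cons_self⟩,
          fun t ht => (mem_pvIndex documents t p.1).2 ⟨p, hp, rfl, hall t (List.mem_cons_of_mem _ ht)⟩⟩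
      · rintro ⟨h0, h⟩
        obtain ⟨p, hp, hip, ht0⟩ := (mem_pvIndex documents t0 i).1 h0
        refine ⟨p, ⟨hp, fun t ht => ?_⟩, hip.symm⟩
        rcases List.mem_cons.mp ht with rfl | ht
        · exact ht0
        obtain ⟨q, hq, hiq, htq⟩ := (mem_pvIndex documents t i).1 (h t ht)
        have : q = p := enumerate_fst_inj documents hq hp (by rw [← hiq, hip])
        rwa [this] at htq
    exact (PySem.List.sorted_eq_of_perm_of_pairwise_lt _ _ _ hperm hpair).symm
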